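-- pv_equiv track=rewrite | github.com/chen2073/ECE364-Prelab03 | simpleTask.py | getStreaks
-- ===== SOURCE A (Python) =====
-- def getStreaks(sequence, letters):
--     match_list = []
--     match = []
--     i = 1
--     while i < len(sequence):
--         if sequence[i-1] != sequence[i]:
--             match.append(sequence[0:i])
--             sequence = sequence[i:]
--             i = 1
--         else:
--             i += 1
--     match.append(sequence)
--     for i in range(0, len(match)):
--         test = match[i]
--         if test[0] in letters:
--             match_list.append(test)
--     return match_list
-- ===== SOURCE B (Python) =====
-- def getStreaks(sequence, letters):
--     result = []
--     run = ""
--     for ch in sequence: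
--         if run and ch == run[-1]:
--             run += ch
--         else:
--             if run and run[0] in letters:
--                 result.append(run)
--             run = ch
--     if run and run[0] in letters:
--         result.append(run)
--     return result
-- ===== Notes on version B (the rewrite author's own statement) =====
-- stated objective: faster
-- what changed: B replaces A's quadratic repeated-slicing while-loop (which rebuilds the remaining string after each run) with a single linear pass that grows the current run and filters it as soon as it closes.
import Mathlib
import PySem

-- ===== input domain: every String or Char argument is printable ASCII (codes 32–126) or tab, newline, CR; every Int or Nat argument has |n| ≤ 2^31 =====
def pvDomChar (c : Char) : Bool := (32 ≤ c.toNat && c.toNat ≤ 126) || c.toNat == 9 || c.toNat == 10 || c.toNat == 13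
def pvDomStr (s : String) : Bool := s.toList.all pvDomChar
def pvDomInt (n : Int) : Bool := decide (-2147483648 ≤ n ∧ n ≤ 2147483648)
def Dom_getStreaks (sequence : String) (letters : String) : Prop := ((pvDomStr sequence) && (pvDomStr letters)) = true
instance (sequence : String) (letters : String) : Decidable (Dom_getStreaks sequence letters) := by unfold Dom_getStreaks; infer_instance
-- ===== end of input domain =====

-- B replaces A's quadratic repeated-slicing while-loop with one linear pass that grows the
-- current run and filters it as soon as it closes (objective: faster, asymptotic).

-- ===== PORT A =====
-- A's while-loop: scan with index i over the (re-sliced) sequence, cutting off a run whenever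
-- sequence[i-1] != sequence[i].
def pvALoop (s : List Char) (i : Nat) (acc : List (List Char)) : List (List Char) :=
  if _h : i < s.length then
    if h2 : s[i-1]? ≠ s[i]? then
      pvALoop (s.drop i) 1 (acc ++ [s.take i])
    else
      pvALoop s (i+1) acc
  else acc ++ [s]
termination_by 2 * s.length - i
decreasing_by
  · have hi : 1 ≤ i := by
      rcases Nat.eq_zero_or_pos i with h0 | h0
      · subst h0; simp at h2
      · exact h0
    simp only [List.length_drop]; omega
  · omega

-- A's second loop: for each collected run test, keep it if test[0] is in letters.
-- (test[0] on the empty run raises IndexError in Python; that happens only for the empty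
-- sequence, which Pre_ excludes — the [] branch here is unreachable on Pre_.)
def pvAFilter (letters : List Char) : List (List Char) → List (List Char)
  | [] => []
  | t :: rest =>
    match t with
    | [] => pvAFilter letters rest
    | c :: _ => if c ∈ letters then t :: pvAFilter letters rest else pvAFilter letters rest

def getStreaks (sequence : String) (letters : String) : List String :=
  (pvAFilter letters.toList (pvALoop sequence.toList 1 [])).map (fun r => String.mk r)

-- ===== PORT B =====
-- B's helper: flush the current run into the result if it is nonempty and starts in letters.
def pvBPush (letters : List Char) (result : List (List Char)) (run : List Char) : List (List Char) :=
  match run with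
  | [] => result
  | c :: _ => if c ∈ letters then result ++ [run] else result

-- B's loop body: extend the run if ch equals its last character, else flush and restart.
def pvBStep (letters : List Char) (st : List (List Char) × List Char) (ch : Char) :
    List (List Char) × List Char :=
  if st.2.getLast? = some ch then (st.1, st.2 ++ [ch])
  else (pvBPush letters st.1 st.2, [ch])

def getStreaks_alt (sequence : String) (letters : String) : List String :=
  let st := sequence.toList.foldl (pvBStep letters.toList) ([], [])
  (pvBPush letters.toList st.1 st.2).map (fun r => String.mk r)

-- ===== PRECONDITION & SPEC =====
-- Pre_ excludes only the empty sequence, on which A raises IndexError.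
def Pre_getStreaks (sequence : String) (letters : String) : Prop := sequence ≠ ""
instance (sequence : String) (letters : String) : Decidable (Pre_getStreaks sequence letters) := by
  unfold Pre_getStreaks; infer_instance
def pvWitness_getStreaks : String × String := ("aabba", "a")

def Spec_getStreaks (sequence : String) (letters : String) (out : List String) : Prop := out = getStreaks_alt sequence letters
instance (sequence : String) (letters : String) (out : List String) : Decidable (Spec_getStreaks sequence letters out) := by unfold Spec_getStreaks; infer_instance

-- ===== CLAIM (what is proved, stated in full; the proofs are below) =====
def Claim_equal_getStreaks : Prop := ∀ (sequence : String) (letters : String), Dom_getStreaks sequence letters → Pre_getStreaks sequence letters → Spec_getStreaks sequence letters (getStreaks sequence letters)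
-- ===== LEMMAS AND PROOFS =====

-- Canonical grouping of a list into maximal runs of equal characters.
def pvRuns : List Char → List (List Char)
  | [] => []
  | c :: cs =>
    match pvRuns cs with
    | [] => [[c]]
    | r :: rs => if r.head? = some c then (c :: r) :: rs else [c] :: r :: rs

lemma pvRuns_cons_head (c : Char) (cs : List Char) :
    ∃ t rs, pvRuns (c :: cs) = (c :: t) :: rs := by
  rcases h : pvRuns cs with _ | ⟨r, rs⟩
  · exact ⟨[], [], by simp [pvRuns, h]⟩
  · by_cases hh : r.head? = some c
    · exact ⟨r, rs, by simp [pvRuns, h, hh]⟩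
    · exact ⟨[], r :: rs, by simp [pvRuns, h, hh]⟩

lemma pvRuns_replicate (a : Char) (k : Nat) (hk : 1 ≤ k) :
    pvRuns (List.replicate k a) = [List.replicate k a] := by
  induction k with
  | zero => omega
  | succ n ih =>
    rcases Nat.eq_zero_or_pos n with h | h
    · subst h; simp [pvRuns]
    · have hh : (List.replicate n a).head? = some a := by
        cases n with
        | zero => omega
        | succ m => simp [List.replicate_succ]
      rw [List.replicate_succ]
      simp [pvRuns, ih h, hh, ← List.replicate_succ]

lemma pvRuns_replicate_append (a b : Char) (k : Nat) (cs : List Char)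
    (hk : 1 ≤ k) (hab : a ≠ b) :
    pvRuns (List.replicate k a ++ b :: cs) = List.replicate k a :: pvRuns (b :: cs) := by
  induction k with
  | zero => omega
  | succ n ih =>
    rcases Nat.eq_zero_or_pos n with h | h
    · subst h
      obtain ⟨t, rs, hr⟩ := pvRuns_cons_head b cs
      show pvRuns (a :: b :: cs) = [a] :: pvRuns (b :: cs)
      rw [pvRuns, hr]
      simp [Ne.symm hab]
    · have hh : (List.replicate n a).head? = some a := by
        cases n with
        | zero => omega
        | succ m => simp [List.replicate_succ]
      rw [List.replicate_succ, List.cons_append]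
      simp [pvRuns, ih h, hh]

lemma pvAFilter_cons (lt : List Char) (x : List Char) (l : List (List Char)) :
    pvAFilter lt (x :: l) = pvAFilter lt [x] ++ pvAFilter lt l := by
  cases x with
  | nil => simp [pvAFilter]
  | cons c t => by_cases h : c ∈ lt <;> simp [pvAFilter, h]

lemma pvBPush_filter (lt : List Char) (result : List (List Char)) (run : List Char) :
    pvBPush lt result run = result ++ pvAFilter lt [run] := by
  cases run with
  | nil => simp [pvBPush, pvAFilter]
  | cons c t => by_cases h : c ∈ lt <;> simp [pvBPush, pvAFilter, h]

-- A's while-loop computes the canonical runs, given that the first k characters form one run.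
lemma pvALoop_eq (rest : List Char) : ∀ (a : Char) (k : Nat) (acc : List (List Char)), 1 ≤ k →
    pvALoop (List.replicate k a ++ rest) k acc = acc ++ pvRuns (List.replicate k a ++ rest) := by
  induction rest with
  | nil =>
    intro a k acc hk
    rw [pvALoop]
    simp [pvRuns_replicate a k hk]
  | cons b rest' ih =>
    intro a k acc hk
    have hlen : k < (List.replicate k a ++ b :: rest').length := by
      simp
    have h1 : (List.replicate k a ++ b :: rest')[k-1]? = some a := by
      rw [List.getElem?_append_left (by simp; omega)]
      simp [List.getElem?_replicate]
      omega
    have h2 : (List.replicate k a ++ b :: rest')[k]? = some b := by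
      rw [List.getElem?_append_right (by simp)]
      simp
    by_cases hab : a = b
    · subst hab
      rw [pvALoop]
      have hrepl : List.replicate k a ++ a :: rest' = List.replicate (k+1) a ++ rest' := by
        rw [List.replicate_succ', List.append_assoc]; rfl
      have hnn : ¬ ((List.replicate k a ++ a :: rest')[k-1]? ≠ (List.replicate k a ++ a :: rest')[k]?) := by
        rw [h1, h2]; simp
      rw [dif_pos hlen, dif_neg hnn, hrepl]
      exact ih a (k+1) acc (by omega)
    · rw [pvALoop]
      have htake : (List.replicate k a ++ b :: rest').take k = List.replicate k a :=
        List.take_left' (by simp)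
      have hdrop : (List.replicate k a ++ b :: rest').drop k = b :: rest' :=
        List.drop_left' (by simp)
      have hne : (List.replicate k a ++ b :: rest')[k-1]? ≠ (List.replicate k a ++ b :: rest')[k]? := by
        rw [h1, h2]; simp [hab]
      rw [dif_pos hlen, dif_pos hne, htake, hdrop]
      have := ih b 1 (acc ++ [List.replicate k a]) (by omega)
      simp only [List.replicate_one, List.singleton_append] at this
      rw [this, pvRuns_replicate_append a b k rest' hk hab]
      simp

-- B's fold computes the filtered runs, given the pending run is a nonempty constant block.
lemma pvBFold_eq (cs : List Char) : ∀ (lt : List Char) (result : List (List Char)) (a : Char) (k : Nat),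
    1 ≤ k →
    pvBPush lt (cs.foldl (pvBStep lt) (result, List.replicate k a)).1
        (cs.foldl (pvBStep lt) (result, List.replicate k a)).2
      = result ++ pvAFilter lt (pvRuns (List.replicate k a ++ cs)) := by
  induction cs with
  | nil =>
    intro lt result a k hk
    simp only [List.foldl_nil, List.append_nil]
    rw [pvRuns_replicate a k hk, pvBPush_filter]
  | cons b cs' ih =>
    intro lt result a k hk
    have hlast : (List.replicate k a).getLast? = some a := by
      cases k with
      | zero => omega
      | succ n => simp [List.getLast?_replicate]
    by_cases hab : a = b
    · subst hab
      have hstep : pvBStep lt (result, List.replicate k a) a = (result, List.replicate (k+1) a) := by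
        simp [pvBStep, hlast, List.replicate_succ']
      have hrepl : List.replicate k a ++ a :: cs' = List.replicate (k+1) a ++ cs' := by
        rw [List.replicate_succ', List.append_assoc]; rfl
      rw [List.foldl_cons, hstep, hrepl]
      exact ih lt result a (k+1) (by omega)
    · have hstep : pvBStep lt (result, List.replicate k a) b
          = (result ++ pvAFilter lt [List.replicate k a], [b]) := by
        simp [pvBStep, hlast, hab, pvBPush_filter]
      rw [List.foldl_cons, hstep]
      have := ih lt (result ++ pvAFilter lt [List.replicate k a]) b 1 (by omega)
      simp only [List.replicate_one, List.singleton_append] at this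
      rw [this, pvRuns_replicate_append a b k cs' hk hab]
      conv_rhs => rw [pvAFilter_cons]
      simp [pvAFilter]

-- ===== VERDICT (by name: the statement is the Claim_ definition above) =====
theorem getStreaks_spec : Claim_equal_getStreaks := by
  intro sequence letters _hdom hpre
  unfold Spec_getStreaks getStreaks getStreaks_alt
  have hne : sequence.toList ≠ [] := by
    intro h
    exact hpre (by rw [← String.toList_inj]; simpa using h)
  rcases hcs : sequence.toList with _ | ⟨c, cs⟩
  · exact absurd hcs hne
  · have hA := pvALoop_eq cs c 1 [] (by omega)
    simp only [List.replicate_one, List.singleton_append, List.nil_append] at hA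
    have hfirst : pvBStep letters.toList ([], []) c = ([], [c]) := by
      simp [pvBStep, pvBPush]
    have hB := pvBFold_eq cs letters.toList [] c 1 (by omega)
    simp only [List.replicate_one, List.singleton_append, List.nil_append] at hB
    rw [hA]
    simp only [List.foldl_cons, hfirst, hB]
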